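-- pv_equiv track=rewrite | github.com/mgsrood/aardg_woocommerce | webhooks/modules/product_utils.py | determine_base_product
-- ===== SOURCE A (Python) =====
-- def determine_base_product(sku):
--     # Base product op basis van SKU
--     if any(substring in sku for substring in ['Starter', 'S-', '8719327215111', 'S-XL']):
--         return 'Starter'
--     elif any(substring in sku for substring in ['P28', 'P56', 'P-', '8719327215180', 'X2', 'C2']):
--         return 'Probiotica'
--     elif any(substring in sku for substring in ['W4', 'W8','W-', '8719326399393']):
--         return 'Waterkefir'
--     elif any(substring in sku for substring in ['K4', 'K8', 'K-', '8719326399386']):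
--         return 'Kombucha'
--     elif any(substring in sku for substring in ['M4', 'M8', 'M-', '8719327215135', 'MP-XL']):
--         return 'Mix Originals'
--     elif any(substring in sku for substring in ['G12', 'G-', '8719326399379']):
--         return 'Gember'
--     elif any(substring in sku for substring in ['C12', 'C-', '8719326399355']):
--         return 'Citroen'
--     elif any(substring in sku for substring in ['B12', 'B-', '8719326399362']):
--         return 'Bloem'
--     elif any(substring in sku for substring in ['F12', 'F-', '8719327215128', 'F-X2', 'F-XL']):
--         return 'Frisdrank Mix'
--     else:
--         return 'Onbekend'
-- ===== SOURCE B (Python) =====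
-- # Min-rank scan over one flattened (pattern, rank) table instead of an if/elif chain of any()-checks.
-- _LABELS = ['Starter', 'Probiotica', 'Waterkefir', 'Kombucha', 'Mix Originals',
--            'Gember', 'Citroen', 'Bloem', 'Frisdrank Mix']
-- _PATTERNS = [
--     ('Starter', 0), ('S-', 0), ('8719327215111', 0), ('S-XL', 0),
--     ('P28', 1), ('P56', 1), ('P-', 1), ('8719327215180', 1), ('X2', 1), ('C2', 1),
--     ('W4', 2), ('W8', 2), ('W-', 2), ('8719326399393', 2),
--     ('K4', 3), ('K8', 3), ('K-', 3), ('8719326399386', 3),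
--     ('M4', 4), ('M8', 4), ('M-', 4), ('8719327215135', 4), ('MP-XL', 4),
--     ('G12', 5), ('G-', 5), ('8719326399379', 5),
--     ('C12', 6), ('C-', 6), ('8719326399355', 6),
--     ('B12', 7), ('B-', 7), ('8719326399362', 7),
--     ('F12', 8), ('F-', 8), ('8719327215128', 8), ('F-X2', 8), ('F-XL', 8),
-- ]
--
-- def determine_base_product(sku):
--     best = 9
--     for pat, rank in _PATTERNS:
--         if pat in sku:
--             best = min(best, rank)
--     return _LABELS[best] if best < 9 else 'Onbekend'
-- ===== Notes on version B (the rewrite author's own statement) =====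
-- stated objective: alternative
-- what changed: Replaces the nine-branch if/elif chain of any()-checks by a single min-rank fold over one flattened (pattern, rank) table, then indexes the label list; precedence is carried by the numeric rank instead of branch order.
import Mathlib
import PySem

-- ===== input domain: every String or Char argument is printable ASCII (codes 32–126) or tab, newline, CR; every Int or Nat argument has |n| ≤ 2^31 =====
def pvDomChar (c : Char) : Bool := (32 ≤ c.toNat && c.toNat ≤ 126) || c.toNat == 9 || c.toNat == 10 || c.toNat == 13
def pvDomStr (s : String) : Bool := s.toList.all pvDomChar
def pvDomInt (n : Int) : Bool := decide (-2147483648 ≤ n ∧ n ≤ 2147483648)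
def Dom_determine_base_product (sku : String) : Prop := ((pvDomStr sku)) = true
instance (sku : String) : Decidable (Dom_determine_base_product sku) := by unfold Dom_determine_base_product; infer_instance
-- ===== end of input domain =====

-- B replaces A's if/elif chain of any()-checks by a min-rank fold over one flattened (pattern, rank) table ("alternative": same cost, different structure).

-- ===== PORT A =====
def determine_base_product (sku : String) : String :=
  if ["Starter", "S-", "8719327215111", "S-XL"].any (fun sub => PySem.Str.isIn sub sku) then "Starter"
  else if ["P28", "P56", "P-", "8719327215180", "X2", "C2"].any (fun sub => PySem.Str.isIn sub sku) then "Probiotica"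
  else if ["W4", "W8", "W-", "8719326399393"].any (fun sub => PySem.Str.isIn sub sku) then "Waterkefir"
  else if ["K4", "K8", "K-", "8719326399386"].any (fun sub => PySem.Str.isIn sub sku) then "Kombucha"
  else if ["M4", "M8", "M-", "8719327215135", "MP-XL"].any (fun sub => PySem.Str.isIn sub sku) then "Mix Originals"
  else if ["G12", "G-", "8719326399379"].any (fun sub => PySem.Str.isIn sub sku) then "Gember"
  else if ["C12", "C-", "8719326399355"].any (fun sub => PySem.Str.isIn sub sku) then "Citroen"
  else if ["B12", "B-", "8719326399362"].any (fun sub => PySem.Str.isIn sub sku) then "Bloem"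
  else if ["F12", "F-", "8719327215128", "F-X2", "F-XL"].any (fun sub => PySem.Str.isIn sub sku) then "Frisdrank Mix"
  else "Onbekend"

-- ===== PORT B =====
def bpLabels : List String :=
  ["Starter", "Probiotica", "Waterkefir", "Kombucha", "Mix Originals",
   "Gember", "Citroen", "Bloem", "Frisdrank Mix"]

def bpPatterns : List (String × Nat) :=
  [("Starter", 0), ("S-", 0), ("8719327215111", 0), ("S-XL", 0),
   ("P28", 1), ("P56", 1), ("P-", 1), ("8719327215180", 1), ("X2", 1), ("C2", 1),
   ("W4", 2), ("W8", 2), ("W-", 2), ("8719326399393", 2),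
   ("K4", 3), ("K8", 3), ("K-", 3), ("8719326399386", 3),
   ("M4", 4), ("M8", 4), ("M-", 4), ("8719327215135", 4), ("MP-XL", 4),
   ("G12", 5), ("G-", 5), ("8719326399379", 5),
   ("C12", 6), ("C-", 6), ("8719326399355", 6),
   ("B12", 7), ("B-", 7), ("8719326399362", 7),
   ("F12", 8), ("F-", 8), ("8719327215128", 8), ("F-X2", 8), ("F-XL", 8)]

def bpBest (sku : String) : Nat :=
  bpPatterns.foldl (fun acc pr => if PySem.Str.isIn pr.1 sku then min acc pr.2 else acc) 9

def determine_base_product_alt (sku : String) : String :=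
  if bpBest sku < 9 then bpLabels.getD (bpBest sku) "" else "Onbekend"

-- ===== PRECONDITION & SPEC =====
def Spec_determine_base_product (sku : String) (out : String) : Prop := out = determine_base_product_alt sku
instance (sku : String) (out : String) : Decidable (Spec_determine_base_product sku out) := by unfold Spec_determine_base_product; infer_instance

-- ===== CLAIM (what is proved, stated in full; the proofs are below) =====
def Claim_equal_determine_base_product : Prop := ∀ (sku : String), Dom_determine_base_product sku → Spec_determine_base_product sku (determine_base_product sku)

-- ===== LEMMAS AND PROOFS =====

-- Collapsing one rank group of the fold: a block of patterns all carrying rank r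
-- contributes `min acc r` exactly when one of them occurs in the sku.
theorem bp_fold_group (q : String → Bool) (ps : List String) (r : Nat)
    (rest : List (String × Nat)) (acc : Nat) :
    List.foldl (fun acc pr => if q pr.1 then min acc pr.2 else acc) acc
        (ps.map (fun p => (p, r)) ++ rest)
      = List.foldl (fun acc pr => if q pr.1 then min acc pr.2 else acc)
          (if ps.any q then min acc r else acc) rest := by
  induction ps generalizing acc with
  | nil => simp
  | cons p ps ih =>
    simp only [List.map_cons, List.cons_append, List.foldl_cons, List.any_cons]
    rw [ih]
    by_cases h : q p = true <;> by_cases hq : ps.any q = true <;>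
      simp [h, hq]

-- Both results, as a function of the nine group-match booleans.
theorem bp_chain_eq : ∀ b0 b1 b2 b3 b4 b5 b6 b7 b8 : Bool,
    (if b0 then "Starter"
     else if b1 then "Probiotica"
     else if b2 then "Waterkefir"
     else if b3 then "Kombucha"
     else if b4 then "Mix Originals"
     else if b5 then "Gember"
     else if b6 then "Citroen"
     else if b7 then "Bloem"
     else if b8 then "Frisdrank Mix"
     else "Onbekend")
    = (let a0 : Nat := if b0 then min 9 0 else 9
       let a1 := if b1 then min a0 1 else a0
       let a2 := if b2 then min a1 2 else a1
       let a3 := if b3 then min a2 3 else a2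
       let a4 := if b4 then min a3 4 else a3
       let a5 := if b5 then min a4 5 else a4
       let a6 := if b6 then min a5 6 else a5
       let a7 := if b7 then min a6 7 else a6
       let a8 := if b8 then min a7 8 else a7
       if a8 < 9 then bpLabels.getD a8 "" else "Onbekend") := by
  decide

theorem bp_split : bpPatterns =
    ["Starter", "S-", "8719327215111", "S-XL"].map (fun p => (p, 0)) ++
    (["P28", "P56", "P-", "8719327215180", "X2", "C2"].map (fun p => (p, 1)) ++
    (["W4", "W8", "W-", "8719326399393"].map (fun p => (p, 2)) ++
    (["K4", "K8", "K-", "8719326399386"].map (fun p => (p, 3)) ++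
    (["M4", "M8", "M-", "8719327215135", "MP-XL"].map (fun p => (p, 4)) ++
    (["G12", "G-", "8719326399379"].map (fun p => (p, 5)) ++
    (["C12", "C-", "8719326399355"].map (fun p => (p, 6)) ++
    (["B12", "B-", "8719326399362"].map (fun p => (p, 7)) ++
    (["F12", "F-", "8719327215128", "F-X2", "F-XL"].map (fun p => (p, 8)) ++
    ([] : List (String × Nat))))))))))
    := by rfl

-- ===== VERDICT (by name: the statement is the Claim_ definition above) =====
theorem determine_base_product_spec : Claim_equal_determine_base_product := by
  intro sku _
  unfold Spec_determine_base_product determine_base_product determine_base_product_alt bpBest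
  rw [bp_split]
  rw [bp_fold_group (fun p => PySem.Str.isIn p sku), bp_fold_group (fun p => PySem.Str.isIn p sku),
      bp_fold_group (fun p => PySem.Str.isIn p sku), bp_fold_group (fun p => PySem.Str.isIn p sku),
      bp_fold_group (fun p => PySem.Str.isIn p sku), bp_fold_group (fun p => PySem.Str.isIn p sku),
      bp_fold_group (fun p => PySem.Str.isIn p sku), bp_fold_group (fun p => PySem.Str.isIn p sku),
      bp_fold_group (fun p => PySem.Str.isIn p sku)]
  simp only [List.foldl_nil]
  exact bp_chain_eq _ _ _ _ _ _ _ _ _
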